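-- pv_equiv track=rewrite | github.com/JJo-0/JJo-0.github.io | scripts/normalize_tags.py | parse_frontmatter_sections
-- ===== SOURCE A (Python) =====
-- from typing import Dict, List, Tuple
--
-- def parse_frontmatter_sections(text: str) -> Tuple[str, List[str], str] | None:
--     lines = text.splitlines(keepends=True)
--     start = None
--     for i, line in enumerate(lines):
--         if line.strip() == "---":
--             start = i
--             break
--     if start is None:
--         return None
--
--     end = None
--     for i in range(start + 1, len(lines)):
--         if lines[i].strip() == "---":
--             end = i
--             break
--     if end is None:
--         return None
--
--     prefix = "".join(lines[:start])
--     fm_lines = lines[start + 1 : end]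
--     body = "".join(lines[end + 1 :])
--     return prefix, fm_lines, body
-- ===== SOURCE B (Python) =====
-- def parse_frontmatter_sections(text):
--     state = 0
--     prefix, fm, body = [], [], []
--     for line in text.splitlines(keepends=True):
--         if state < 2 and line.strip() == "---":
--             state += 1
--         elif state == 0:
--             prefix.append(line)
--         elif state == 1:
--             fm.append(line)
--         else:
--             body.append(line)
--     if state < 2:
--         return None
--     return "".join(prefix), fm, "".join(body)
-- ===== Notes on version B (the rewrite author's own statement) =====
-- stated objective: alternative
-- what changed: A makes two short-circuiting search loops to find the first two delimiter indices and then slices/joins the line list; B is a single-pass state machine over the lines with three accumulators (prefix/frontmatter/body) and a delimiter counter, never computing indices or slices.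
import Mathlib
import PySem

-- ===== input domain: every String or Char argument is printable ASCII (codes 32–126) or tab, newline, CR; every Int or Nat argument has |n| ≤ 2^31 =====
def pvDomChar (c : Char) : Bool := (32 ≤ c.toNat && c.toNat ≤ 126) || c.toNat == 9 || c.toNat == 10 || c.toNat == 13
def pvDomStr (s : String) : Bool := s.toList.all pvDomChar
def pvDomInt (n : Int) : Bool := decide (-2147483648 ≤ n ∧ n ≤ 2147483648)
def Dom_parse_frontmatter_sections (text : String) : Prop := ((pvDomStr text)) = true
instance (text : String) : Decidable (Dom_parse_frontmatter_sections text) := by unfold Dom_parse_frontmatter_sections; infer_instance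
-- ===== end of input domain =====

-- B replaces A's two index-finding search loops plus slicing by a single-pass state machine with three accumulators (objective: alternative).

-- ===== PORT A =====
-- line.strip() == "---"
def pfsIsDelim (line : String) : Bool := PySem.Str.strip line == "---"

-- hand port of str.splitlines(keepends=True) (not in PySem); exact on Dom_parse_frontmatter_sections
-- (printable ASCII + tab/LF/CR), where the only Python line breaks are "\n", "\r", "\r\n"
def pfsSplitKE (acc : List Char) : List Char → List String
  | [] => if acc.isEmpty then [] else [String.ofList acc.reverse]
  | '\r' :: '\n' :: rest => String.ofList (acc.reverse ++ ['\r', '\n']) :: pfsSplitKE [] rest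
  | '\r' :: rest => String.ofList (acc.reverse ++ ['\r']) :: pfsSplitKE [] rest
  | '\n' :: rest => String.ofList (acc.reverse ++ ['\n']) :: pfsSplitKE [] rest
  | c :: rest => pfsSplitKE (c :: acc) rest

-- A's first loop: 'for i, line in enumerate(lines): if line.strip() == "---": start = i; break'
def pfsLoop1 : List (Int × String) → Option Int
  | [] => none
  | (i, line) :: rest => if pfsIsDelim line then some i else pfsLoop1 rest

-- A's second loop: 'for i in range(start + 1, len(lines)): if lines[i].strip() == "---": end = i; break'
-- (i is always in range here, so the .getD "" default is never taken)
def pfsLoop2 (lines : List String) : List Int → Option Int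
  | [] => none
  | i :: rest =>
      if pfsIsDelim ((PySem.List.pyGet? lines i).getD "") then some i
      else pfsLoop2 lines rest

def parse_frontmatter_sections (text : String) : Option (String × List String × String) :=
  let lines := pfsSplitKE [] text.toList
  match pfsLoop1 (PySem.List.enumerate lines) with
  | none => none
  | some start =>
    match pfsLoop2 lines (PySem.List.pyRange (start + 1) (PySem.List.len lines) 1) with
    | none => none
    | some stop =>
        some (PySem.Str.join "" (PySem.List.slice lines none (some start)),
              PySem.List.slice lines (some (start + 1)) (some stop),
              PySem.Str.join "" (PySem.List.slice lines (some (stop + 1)) none))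

-- ===== PORT B =====
-- B's single for-loop: state counts delimiters seen (capped at 2); each non-delimiter line is
-- routed to prefix / frontmatter / body according to the current state.  The Python appends to
-- three list accumulators; the recursion builds the same three lists front-to-back.
def pfsScan (st : Nat) : List String → Nat × List String × List String × List String
  | [] => (st, [], [], [])
  | line :: rest =>
      if st < 2 ∧ pfsIsDelim line = true then pfsScan (st + 1) rest
      else
        let r := pfsScan st rest
        match st with
        | 0 => (r.1, line :: r.2.1, r.2.2.1, r.2.2.2)
        | 1 => (r.1, r.2.1, line :: r.2.2.1, r.2.2.2)
        | _ => (r.1, r.2.1, r.2.2.1, line :: r.2.2.2)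

def parse_frontmatter_sections_alt (text : String) : Option (String × List String × String) :=
  let r := pfsScan 0 (pfsSplitKE [] text.toList)
  if r.1 < 2 then none
  else some (PySem.Str.join "" r.2.1, r.2.2.1, PySem.Str.join "" r.2.2.2)

-- ===== PRECONDITION & SPEC =====
def Spec_parse_frontmatter_sections (text : String) (out : Option (String × List String × String)) : Prop := out = parse_frontmatter_sections_alt text
instance (text : String) (out : Option (String × List String × String)) : Decidable (Spec_parse_frontmatter_sections text out) := by unfold Spec_parse_frontmatter_sections; infer_instance

-- ===== CLAIM (what is proved, stated in full; the proofs are below) =====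
def Claim_equal_parse_frontmatter_sections : Prop := ∀ (text : String), Dom_parse_frontmatter_sections text → Spec_parse_frontmatter_sections text (parse_frontmatter_sections text)

-- ===== LEMMAS AND PROOFS =====

-- "clean" = no delimiter line
def pfsClean (xs : List String) : Prop := ∀ l ∈ xs, pfsIsDelim l = false

-- every list is either clean or splits at its first delimiter
theorem pfs_decomp (xs : List String) :
    pfsClean xs ∨ ∃ pre d rest, xs = pre ++ d :: rest ∧ pfsClean pre ∧ pfsIsDelim d = true := by
  induction xs with
  | nil => exact Or.inl (fun l h => absurd h (List.not_mem_nil))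
  | cons x rest ih =>
    by_cases hx : pfsIsDelim x = true
    · refine Or.inr ⟨[], x, rest, rfl, ?_, hx⟩
      intro l h; exact absurd h (List.not_mem_nil)
    · have hx' : pfsIsDelim x = false := by simpa using hx
      rcases ih with hc | ⟨pre, d, r, h1, h2, h3⟩
      · refine Or.inl ?_
        intro l h
        rcases List.mem_cons.1 h with h | h
        · exact h ▸ hx'
        · exact hc _ h
      · refine Or.inr ⟨x :: pre, d, r, by rw [h1, List.cons_append], ?_, h3⟩
        intro l h
        rcases List.mem_cons.1 h with h | h
        · exact h ▸ hx'
        · exact h2 _ h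

-- ===== state-machine characterisations (B side) =====

theorem pfsScan_two (xs : List String) : pfsScan 2 xs = (2, [], [], xs) := by
  induction xs with
  | nil => rfl
  | cons x rest ih => simp [pfsScan, ih]

theorem pfsScan_one_clean (xs : List String) (h : pfsClean xs) :
    pfsScan 1 xs = (1, [], xs, []) := by
  induction xs with
  | nil => rfl
  | cons x rest ih =>
    have hx : pfsIsDelim x = false := h _ (by simp)
    have ih' := ih (fun l hl => h _ (by simp [hl]))
    simp [pfsScan, hx, ih']

theorem pfsScan_one_split (mid : List String) (d : String) (post : List String)
    (hm : pfsClean mid) (hd : pfsIsDelim d = true) :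
    pfsScan 1 (mid ++ d :: post) = (2, [], mid, post) := by
  induction mid with
  | nil => simp [pfsScan, hd, pfsScan_two]
  | cons x rest ih =>
    have hx : pfsIsDelim x = false := hm _ (by simp)
    have ih' := ih (fun l hl => hm _ (by simp [hl]))
    simp [pfsScan, hx, ih']

theorem pfsScan_zero_clean (xs : List String) (h : pfsClean xs) :
    pfsScan 0 xs = (0, xs, [], []) := by
  induction xs with
  | nil => rfl
  | cons x rest ih =>
    have hx : pfsIsDelim x = false := h _ (by simp)
    have ih' := ih (fun l hl => h _ (by simp [hl]))
    simp [pfsScan, hx, ih']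

theorem pfsScan_zero_two (pre : List String) (d : String) (rest : List String)
    (hp : pfsClean pre) (hd : pfsIsDelim d = true) (hr : pfsClean rest) :
    pfsScan 0 (pre ++ d :: rest) = (1, pre, rest, []) := by
  induction pre with
  | nil => simp [pfsScan, hd, pfsScan_one_clean rest hr]
  | cons x xs ih =>
    have hx : pfsIsDelim x = false := hp _ (by simp)
    have ih' := ih (fun l hl => hp _ (by simp [hl]))
    simp [pfsScan, hx, ih']

theorem pfsScan_zero_full (pre : List String) (d1 : String) (mid : List String) (d2 : String)
    (post : List String) (hp : pfsClean pre) (h1 : pfsIsDelim d1 = true)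
    (hm : pfsClean mid) (h2 : pfsIsDelim d2 = true) :
    pfsScan 0 (pre ++ d1 :: (mid ++ d2 :: post)) = (2, pre, mid, post) := by
  induction pre with
  | nil => simp [pfsScan, h1, pfsScan_one_split mid d2 post hm h2]
  | cons x xs ih =>
    have hx : pfsIsDelim x = false := hp _ (by simp)
    have ih' := ih (fun l hl => hp _ (by simp [hl]))
    simp [pfsScan, hx, ih']

-- ===== search-loop characterisations (A side) =====

theorem pfsLoop1_clean (xs : List String) (h : pfsClean xs) :
    ∀ k : Int, pfsLoop1 (PySem.List.enumerate xs k) = none := by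
  induction xs with
  | nil => intro k; rfl
  | cons x rest ih =>
    intro k
    have hx : pfsIsDelim x = false := h _ (by simp)
    rw [PySem.List.enumerate_cons]
    simp [pfsLoop1, hx, ih (fun l hl => h _ (by simp [hl])) (k + 1)]

theorem pfsLoop1_split (pre : List String) (d : String) (rest : List String)
    (hp : pfsClean pre) (hd : pfsIsDelim d = true) :
    ∀ k : Int, pfsLoop1 (PySem.List.enumerate (pre ++ d :: rest) k) = some (k + pre.length) := by
  induction pre with
  | nil => intro k; rw [List.nil_append, PySem.List.enumerate_cons]; simp [pfsLoop1, hd]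
  | cons x xs ih =>
    intro k
    have hx : pfsIsDelim x = false := hp _ (by simp)
    rw [List.cons_append, PySem.List.enumerate_cons]
    have := ih (fun l hl => hp _ (by simp [hl])) (k + 1)
    simp only [pfsLoop1, hx, Bool.false_eq_true, if_false, this]
    congr 1
    simp only [List.length_cons]
    push_cast
    ring

theorem pfsLoop2_eq (ys : List String) : ∀ (xs : List String),
    pfsLoop2 (xs ++ ys) (PySem.List.pyRange (xs.length : Int) (PySem.List.len (xs ++ ys)) 1) =
    pfsLoop1 (PySem.List.enumerate ys (xs.length : Int)) := by
  induction ys with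
  | nil =>
    intro xs
    rw [PySem.List.pyRange_one_eq_nil (by simp [PySem.List.len_eq])]
    rfl
  | cons y ys ih =>
    intro xs
    rw [PySem.List.pyRange_one_cons (by simp [PySem.List.len_eq])]
    have hget : PySem.List.pyGet? (xs ++ y :: ys) ((xs.length : Nat) : Int) = some y := by
      rw [PySem.List.pyGet?_natCast]
      simp
    rw [PySem.List.enumerate_cons]
    simp only [pfsLoop2, pfsLoop1, hget, Option.getD_some]
    by_cases h : pfsIsDelim y
    · simp [h]
    · simp only [h, if_neg, Bool.false_eq_true, not_false_eq_true]
      have hIH := ih (xs ++ [y])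
      have hlen : (((xs ++ [y]).length : Nat) : Int) = (xs.length : Int) + 1 := by
        simp
      rw [List.append_assoc] at hIH
      simp only [List.singleton_append] at hIH
      rw [hlen] at hIH
      exact hIH

-- ===== VERDICT (by name: the statement is the Claim_ definition above) =====
theorem parse_frontmatter_sections_spec : Claim_equal_parse_frontmatter_sections := by
  intro text _
  unfold Spec_parse_frontmatter_sections
  simp only [parse_frontmatter_sections, parse_frontmatter_sections_alt]
  generalize pfsSplitKE [] text.toList = lines
  rcases pfs_decomp lines with hc | ⟨pre, d1, rest, hsplit, hp, hd1⟩
  · -- no delimiter at all: both return none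
    rw [show PySem.List.enumerate lines = PySem.List.enumerate lines 0 from rfl,
        pfsLoop1_clean lines hc 0, pfsScan_zero_clean lines hc]
    rfl
  · subst hsplit
    have hstart := pfsLoop1_split pre d1 rest hp hd1 0
    rw [show PySem.List.enumerate (pre ++ d1 :: rest) = PySem.List.enumerate (pre ++ d1 :: rest) 0 from rfl,
        hstart]
    dsimp only
    have hs1 : (0 : Int) + (pre.length : Int) + 1 = (((pre ++ [d1]).length : Nat) : Int) := by
      simp
    have hre : pre ++ d1 :: rest = (pre ++ [d1]) ++ rest := by simp
    have hloop2 : pfsLoop2 (pre ++ d1 :: rest)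
        (PySem.List.pyRange ((0 : Int) + (pre.length : Int) + 1)
          (PySem.List.len (pre ++ d1 :: rest)) 1) =
        pfsLoop1 (PySem.List.enumerate rest (((pre ++ [d1]).length : Nat) : Int)) := by
      rw [hs1, hre]; exact pfsLoop2_eq rest (pre ++ [d1])
    rcases pfs_decomp rest with hc2 | ⟨mid, d2, post, hsplit2, hm, hd2⟩
    · -- exactly one delimiter: both return none
      rw [hloop2, pfsLoop1_clean rest hc2, pfsScan_zero_two pre d1 rest hp hd1 hc2]
      rfl
    · subst hsplit2
      rw [hloop2, pfsLoop1_split mid d2 post hm hd2 _,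
          pfsScan_zero_full pre d1 mid d2 post hp hd1 hm hd2]
      dsimp only
      have he : (((pre ++ [d1]).length : Nat) : Int) + (mid.length : Int) =
          (((pre.length + 1 + mid.length : Nat)) : Int) := by
        push_cast
        simp
      have hsA : ((0 : Int) + (pre.length : Int)) = ((pre.length : Nat) : Int) := by simp
      rw [he, hsA]
      -- compute the three slices
      have hslice1 : PySem.List.slice (pre ++ d1 :: (mid ++ d2 :: post)) none
          (some ((pre.length : Nat) : Int)) = pre := by
        rw [PySem.List.slice_to_natCast]
        simp
      have hs1' : ((pre.length : Nat) : Int) + 1 = (((pre.length + 1 : Nat)) : Int) := by simp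
      have hslice2 : PySem.List.slice (pre ++ d1 :: (mid ++ d2 :: post))
          (some (((pre.length : Nat) : Int) + 1)) (some (((pre.length + 1 + mid.length : Nat)) : Int)) = mid := by
        rw [hs1', PySem.List.slice_natCast]
        have hdrop : (pre ++ d1 :: (mid ++ d2 :: post)).drop (pre.length + 1) = mid ++ d2 :: post := by
          rw [show pre ++ d1 :: (mid ++ d2 :: post) = (pre ++ [d1]) ++ (mid ++ d2 :: post) by simp,
              List.drop_append_of_le_length (by simp)]
          simp
        rw [hdrop]
        have : pre.length + 1 + mid.length - (pre.length + 1) = mid.length := by omega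
        rw [this]
        simp
      have hs2' : (((pre.length + 1 + mid.length : Nat)) : Int) + 1 =
          (((pre.length + 1 + mid.length + 1 : Nat)) : Int) := by simp
      have hslice3 : PySem.List.slice (pre ++ d1 :: (mid ++ d2 :: post))
          (some ((((pre.length + 1 + mid.length : Nat)) : Int) + 1)) none = post := by
        rw [hs2', PySem.List.slice_from_natCast,
            show pre ++ d1 :: (mid ++ d2 :: post) = ((pre ++ [d1]) ++ (mid ++ [d2])) ++ post by simp,
            List.drop_left' (by simp only [List.length_append, List.length_cons, List.length_nil]; omega)]
      rw [hslice1, hslice2, hslice3]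
      rfl
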